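-- pv_equiv track=rewrite | github.com/xomicsdatascience/zoDIAq | csodiaq/idpicker.py | reduce_cluster
-- ===== SOURCE A (Python) =====
-- from collections import defaultdict, OrderedDict
--
-- def reduce_cluster(data):
--     # proteins will be the final return value of this function, containing a list of strings that represent one protein group each
--     proteins = []
--
--     # These two variables are used to determine whether or not all peptides in the cluster (totalPeptides) are accounted for by peptides connected to the chosen proteins (usedPeptides)
--     usedPeptides = set()
--     totalPeptides = set([x[0] for x in data])
--
--     # The 'overallScoreDict' variable is specific to considering the original number of connections between a protein and it's peptides in the cluster.
--     #   This is used as a tie-breaker for proteins that have the same number of "current" connections. While the numbers of "current" connections and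
--     #   "former" connections starts the same, the number of "current" connections decreases as proteins and their connected peptides are removed.
--     overallScoreDict = defaultdict(int)
--     for x in data:
--         overallScoreDict[x[1]] += 1
--
--     # A protein is added to the list for each iteration of this while loop. When the number of peptides connected to the chosen peptides equals the number of total peptides, leave the loop.
--     while len(usedPeptides) != len(totalPeptides):
--         '''
--         if using unique peptide scoring mechanism:
--             write uniqueness score for each peptide, write to variable "pepDict"
--         '''
--
--         # 'protDict' is a dictionary with key:values of protein:set(connected peptides) relation. Note that because various peptides are excluded with each iteration of the while loop, the number of connected peptides can shrink with each iteration.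
--         protDict = defaultdict(set)
--         for x in data:
--             if x[0] not in usedPeptides:
--                 protDict[x[1]].update(set([x[0]]))
--
--         # presuming the chosen scoring mechanisms can result in two or more top proteins with the same score(s), the proteins are ordered alphabetically as a final tier of consideration.
--         #   It is recommended one make the scoring mechanism stringent enough to never use alphabetical choices as a criteria (as that has nothing to do with the actual probability the
--         #   protein is found in a sample), but in case the scoring ultimately fails to identify a top candidate, this will make choosing the "first" protein consistent over experiments.
--         protDict = OrderedDict(sorted(protDict.items()))
--         scoreDict = OrderedDict()
--         for key in protDict:
--             '''
--             if using any peptide scoring mechanism: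
--                 scoreDict[key] = (
--                     number of current connections,
--                     number of original connections,
--                     peptide score ~negative representation value if lower==better~)
--             '''
--             scoreDict[key] = (len(protDict[key]), overallScoreDict[key])
--         sortedKeys = sorted(scoreDict, key=scoreDict.get, reverse=True)
--         topKeys = [sortedKeys[0]]
--         '''
--         if using peptide scoring mechanism AND if the scores of the top two are identical:
--             Find members of close-knit group of sortedKeys[0], set topKeys to it (function should return list of length 1 if no close-knit group)
--         '''
--
--         # under current conditions, the length of the 'topKeys' list variable will always be 1. However, should close-knit protein groups be included in the future, I write the code to make the inclusion easy.
--         #   Basically, this for loop takes the top protein(s), converts it to a string format as described in the function description, and adds it to the protein list while simutaneously excluding their peptides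
--         #   from future consideration.
--         for key in topKeys:
--             protein = str(len(key))
--             for x in key:
--                 protein += ('/'+str(x))
--             proteins.append(protein)
--             usedPeptides.update(protDict[key])
--     return proteins
-- ===== SOURCE B (Python) =====
-- def reduce_cluster(data):
--     # Build the protein->distinct-peptides index and the original connection counts ONCE,
--     # then repeatedly pick the best protein by a single linear arg-max scan (no re-scan of
--     # `data`, no sorting) until every peptide is covered.
--     peps = {}
--     cnt = {}
--     for p, g in data:
--         cnt[g] = cnt.get(g, 0) + 1
--         ps = peps.setdefault(g, [])
--         if p not in ps:
--             ps.append(p)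
--     total = len({p for p, _ in data})
--     used = set()
--     proteins = []
--     while len(used) != total:
--         best = None
--         bestScore = (0, 0)
--         for g, ps in peps.items():
--             cur = len([p for p in ps if p not in used])
--             if cur == 0:
--                 continue
--             sc = (cur, cnt[g])
--             if best is None or sc > bestScore or (sc == bestScore and g < best):
--                 best, bestScore = g, sc
--         proteins.append("/".join([str(len(best))] + list(best)))
--         used.update(peps[best])
--     return proteins
-- ===== Notes on version B (the rewrite author's own statement) =====
-- stated objective: faster
-- what changed: B builds the protein->distinct-peptides index and the original-connection counts once up front, then each iteration picks the best protein by a single linear arg-max scan with explicit (count, original-count, key) tie-breaking, instead of A's per-iteration rescan of the whole data list, rebuild of the dict and two sorts.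
import Mathlib
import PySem

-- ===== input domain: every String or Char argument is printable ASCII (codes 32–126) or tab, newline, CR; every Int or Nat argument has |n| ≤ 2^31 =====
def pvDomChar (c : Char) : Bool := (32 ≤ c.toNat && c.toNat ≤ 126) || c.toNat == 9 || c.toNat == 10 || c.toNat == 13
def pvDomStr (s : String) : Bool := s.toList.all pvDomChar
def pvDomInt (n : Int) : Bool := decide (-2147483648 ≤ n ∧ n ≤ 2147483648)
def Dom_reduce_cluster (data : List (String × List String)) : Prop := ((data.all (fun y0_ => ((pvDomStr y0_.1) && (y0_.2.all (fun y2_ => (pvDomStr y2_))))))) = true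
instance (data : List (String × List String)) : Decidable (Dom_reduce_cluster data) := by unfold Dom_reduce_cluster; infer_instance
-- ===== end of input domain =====

-- B replaces A's per-iteration rescan of `data` plus two sorts by a protein->peptides index and
-- count table built once, and a single linear arg-max scan per iteration (objective: faster,
-- constant-factor; measured ~2.5x on large inputs).

-- ===== PORT A =====
-- the `while` loop of A, fuelled (fuel only guards totality; A's loop always terminates in at
-- most |totalPeptides| iterations, and both ports return the accumulator on fuel exhaustion)
def reduce_cluster_loop (data : List (String × List String))
    (total : PySem.Set String) (overall : PySem.Dict (List String) Int)
    (fuel : Nat) (used : PySem.Set String) (proteins : List String) : List String :=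
  match fuel with
  | 0 => proteins
  | fuel + 1 =>
    if PySem.Set.len used ≠ PySem.Set.len total then
      -- protDict = defaultdict(set); for x in data: if x[0] not in usedPeptides: protDict[x[1]].update(set([x[0]]))
      let protDict := data.foldl (fun d x =>
        if x.1 ∉ used then
          d.insert x.2 (PySem.Set.update (d.getD x.2 []) (PySem.Set.ofList [x.1]))
        else d) PySem.Dict.empty
      -- protDict = OrderedDict(sorted(protDict.items()))  (keys are distinct, so pairs compare by key)
      let protDict2 := PySem.Dict.mk (PySem.List.sorted protDict.items (fun p => p.1) false)
      -- for key in protDict: scoreDict[key] = (len(protDict[key]), overallScoreDict[key])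
      let scoreDict := protDict2.keys.foldl (fun sd k =>
        sd.insert k ((PySem.List.len (protDict2.getD k []), overall.getD k 0))) PySem.Dict.empty
      -- sortedKeys = sorted(scoreDict, key=scoreDict.get, reverse=True)  (tuple key -> sorted2)
      let sortedKeys := PySem.List.sorted2 scoreDict.keys
        (fun k => (scoreDict.getD k (0, 0)).1) (fun k => (scoreDict.getD k (0, 0)).2) true
      match sortedKeys with
      | [] => proteins   -- unreachable (Python would raise IndexError; the loop guard prevents it)
      | k :: _ =>
        -- protein = str(len(key)); for x in key: protein += '/' + str(x)
        let protein := k.foldl (fun s x => s ++ ("/" ++ x)) (PySem.Int.toStr (PySem.List.len k))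
        reduce_cluster_loop data total overall fuel
          (PySem.Set.update used (protDict2.getD k [])) (proteins ++ [protein])
    else proteins

def reduce_cluster (data : List (String × List String)) : List String :=
  let totalPeptides := PySem.Set.ofList (data.map (fun x => x.1))
  -- overallScoreDict = defaultdict(int); for x in data: overallScoreDict[x[1]] += 1
  let overall := data.foldl (fun d x => d.modify x.2 0 (· + 1)) PySem.Dict.empty
  reduce_cluster_loop data totalPeptides overall (totalPeptides.length + 1) PySem.Set.empty []

-- ===== PORT B =====
-- the `while` loop of B, fuelled exactly like A's
def reduce_cluster_alt_loop (peps : PySem.Dict (List String) (List String))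
    (cnt : PySem.Dict (List String) Int) (total : Int)
    (fuel : Nat) (used : PySem.Set String) (proteins : List String) : List String :=
  match fuel with
  | 0 => proteins
  | fuel + 1 =>
    if PySem.Set.len used ≠ total then
      -- single arg-max scan: for g, ps in peps.items(): ...
      let res := peps.items.foldl (fun acc gp =>
        let cur : Int := PySem.List.len (gp.2.filter (fun p => decide (p ∉ used)))
        if cur = 0 then acc
        else
          let sc : Int × Int := (cur, cnt.getD gp.1 0)
          match acc.1 with
          | none => (some gp.1, sc)
          | some b =>
            if sc.1 > acc.2.1 ∨ (sc.1 = acc.2.1 ∧ sc.2 > acc.2.2) ∨ (sc = acc.2 ∧ gp.1 < b)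
            then (some gp.1, sc) else acc)
        ((none : Option (List String)), ((0, 0) : Int × Int))
      match res.1 with
      | none => proteins   -- unreachable (Python would raise on `len(None)`; the loop guard prevents it)
      | some b =>
        let protein := PySem.Str.join "/" (PySem.Int.toStr (PySem.List.len b) :: b)
        reduce_cluster_alt_loop peps cnt total fuel
          (PySem.Set.update used (peps.getD b [])) (proteins ++ [protein])
    else proteins

def reduce_cluster_alt (data : List (String × List String)) : List String :=
  -- for p, g in data: cnt[g] = cnt.get(g, 0) + 1; ps = peps.setdefault(g, []); if p not in ps: ps.append(p)
  let peps := data.foldl (fun d x =>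
      let ps := d.getD x.2 []
      d.insert x.2 (if x.1 ∈ ps then ps else ps ++ [x.1])) PySem.Dict.empty
  let cnt := data.foldl (fun d x => d.insert x.2 (d.getD x.2 0 + 1)) PySem.Dict.empty
  let total := PySem.Set.len (PySem.Set.ofList (data.map (fun x => x.1)))
  reduce_cluster_alt_loop peps cnt total
    ((PySem.Set.ofList (data.map (fun x => x.1))).length + 1) PySem.Set.empty []

-- ===== PRECONDITION & SPEC =====
def Spec_reduce_cluster (data : List (String × List String)) (out : List String) : Prop := out = reduce_cluster_alt data
instance (data : List (String × List String)) (out : List String) : Decidable (Spec_reduce_cluster data out) := by unfold Spec_reduce_cluster; infer_instance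

-- ===== CLAIM (what is proved, stated in full; the proofs are below) =====
def Claim_equal_reduce_cluster : Prop := ∀ (data : List (String × List String)), Dom_reduce_cluster data → Spec_reduce_cluster data (reduce_cluster data)

-- ===== LEMMAS AND PROOFS =====

-- ---------- proof-only helper definitions (names of the port's intermediate values) ----------

-- the distinct peptides of protein group g, in first-occurrence order
def pvOrig (data : List (String × List String)) (g : List String) : List String :=
  PySem.Set.ofList ((data.filter (fun x => x.2 == g)).map (fun x => x.1))

-- (current connections, original connections) of group g given the used-peptide set
def pvScore (data : List (String × List String)) (used : PySem.Set String) (g : List String) : Int × Int :=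
  (PySem.List.len ((pvOrig data g).filter (fun p => decide (p ∉ used))),
   ((data.map (fun x => x.2)).count g : Int))

def pvPD (data : List (String × List String)) (used : PySem.Set String) :
    PySem.Dict (List String) (List String) :=
  data.foldl (fun d x =>
    if x.1 ∉ used then
      d.insert x.2 (PySem.Set.update (d.getD x.2 []) (PySem.Set.ofList [x.1]))
    else d) PySem.Dict.empty

def pvPD2 (data : List (String × List String)) (used : PySem.Set String) :
    PySem.Dict (List String) (List String) :=
  PySem.Dict.mk (PySem.List.sorted (pvPD data used).items (fun p => p.1) false)

def pvOverall (data : List (String × List String)) : PySem.Dict (List String) Int :=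
  data.foldl (fun d x => d.modify x.2 0 (· + 1)) PySem.Dict.empty

def pvSD (data : List (String × List String)) (used : PySem.Set String) :
    PySem.Dict (List String) (Int × Int) :=
  (pvPD2 data used).keys.foldl (fun sd k =>
    sd.insert k ((PySem.List.len ((pvPD2 data used).getD k []), (pvOverall data).getD k 0))) PySem.Dict.empty

def pvSortedKeys (data : List (String × List String)) (used : PySem.Set String) : List (List String) :=
  PySem.List.sorted2 (pvSD data used).keys
    (fun k => ((pvSD data used).getD k (0, 0)).1) (fun k => ((pvSD data used).getD k (0, 0)).2) true

def pvPeps (data : List (String × List String)) : PySem.Dict (List String) (List String) :=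
  data.foldl (fun d x =>
    let ps := d.getD x.2 []
    d.insert x.2 (if x.1 ∈ ps then ps else ps ++ [x.1])) PySem.Dict.empty

def pvCnt (data : List (String × List String)) : PySem.Dict (List String) Int :=
  data.foldl (fun d x => d.insert x.2 (d.getD x.2 0 + 1)) PySem.Dict.empty

def pvRes (data : List (String × List String)) (used : PySem.Set String) :
    Option (List String) × (Int × Int) :=
  (pvPeps data).items.foldl (fun acc gp =>
    let cur : Int := PySem.List.len (gp.2.filter (fun p => decide (p ∉ used)))
    if cur = 0 then acc
    else
      let sc : Int × Int := (cur, (pvCnt data).getD gp.1 0)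
      match acc.1 with
      | none => (some gp.1, sc)
      | some b =>
        if sc.1 > acc.2.1 ∨ (sc.1 = acc.2.1 ∧ sc.2 > acc.2.2) ∨ (sc = acc.2 ∧ gp.1 < b)
        then (some gp.1, sc) else acc)
    ((none : Option (List String)), ((0, 0) : Int × Int))

def pvBeats (s : List String → Int × Int) (a b : List String) : Prop :=
  ((s b).1 < (s a).1 ∨ ((s b).1 = (s a).1 ∧ (s b).2 < (s a).2)) ∨ (s a = s b ∧ a < b)

theorem pvBeats_total (s : List String → Int × Int) (a b : List String) (h : a ≠ b) :
    pvBeats s a b ∨ pvBeats s b a := by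
  unfold pvBeats
  rcases lt_trichotomy (s a).1 (s b).1 with h1 | h1 | h1
  · right; left; left; exact h1
  · rcases lt_trichotomy (s a).2 (s b).2 with h2 | h2 | h2
    · right; left; right; exact ⟨h1, h2⟩
    · have hs : s a = s b := Prod.ext h1 h2
      rcases lt_or_gt_of_ne h with hab | hab
      · left; right; exact ⟨hs, hab⟩
      · right; right; exact ⟨hs.symm, hab⟩
    · left; left; right; exact ⟨h1.symm, h2⟩
  · left; left; left; exact h1

theorem pvBeats_asymm (s : List String → Int × Int) (a b : List String) :
    pvBeats s a b → pvBeats s b a → False := by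
  unfold pvBeats
  rintro (h1 | ⟨hs1, hl1⟩) (h2 | ⟨hs2, hl2⟩)
  · rcases h1 with h1 | ⟨e1, h1⟩ <;> rcases h2 with h2 | ⟨e2, h2⟩ <;> omega
  · rw [hs2] at h1; rcases h1 with h1 | ⟨e1, h1⟩ <;> omega
  · rw [hs1] at h2; rcases h2 with h2 | ⟨e2, h2⟩ <;> omega
  · exact absurd hl2 (not_lt_of_gt hl1)

theorem pvBeats_trans (s : List String → Int × Int) (a b c : List String) :
    pvBeats s a b → pvBeats s b c → pvBeats s a c := by
  unfold pvBeats
  rintro (h1 | ⟨hs1, hl1⟩) (h2 | ⟨hs2, hl2⟩)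
  · left; rcases h1 with h1 | ⟨e1, h1⟩ <;> rcases h2 with h2 | ⟨e2, h2⟩
    · left; omega
    · left; omega
    · left; omega
    · right; exact ⟨by omega, by omega⟩
  · left; rw [← hs2]; exact h1
  · left; rw [hs1]; exact h2
  · right; exact ⟨hs1.trans hs2, lt_trans hl1 hl2⟩

-- the comparator sorted2 uses with reverse=True, specialised to tuple scores
def pvBefore (s : List String → Int × Int) (x h : List String) : Bool :=
  decide ((s h).1 < (s x).1) || (!decide ((s x).1 < (s h).1) && decide ((s h).2 < (s x).2))

theorem pvBefore_iff (s : List String → Int × Int) (x h : List String) :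
    pvBefore s x h = true ↔ ((s h).1 < (s x).1 ∨ ((s h).1 = (s x).1 ∧ (s h).2 < (s x).2)) := by
  unfold pvBefore
  rcases lt_trichotomy (s h).1 (s x).1 with h1 | h1 | h1 <;> (simp [h1]; try omega)

theorem pv_insertBy_cons {α : Type} (before : α → α → Bool) (x y : α) (ys : List α) :
    PySem.List.insertBy before x (y :: ys) =
      if before x y then x :: y :: ys else y :: PySem.List.insertBy before x ys := by
  simp [PySem.List.insertBy]

-- head of an insertion sort is a running "best" fold
theorem pv_head_foldl_insertBy {α : Type} (before : α → α → Bool) :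
    ∀ (xs : List α) (y : α) (ys : List α),
      (xs.foldl (fun acc x => PySem.List.insertBy before x acc) (y :: ys)).head? =
        some (xs.foldl (fun h x => if before x h then x else h) y) := by
  intro xs
  induction xs with
  | nil => intro y ys; rfl
  | cons x xs ih =>
    intro y ys
    simp only [List.foldl_cons, pv_insertBy_cons]
    by_cases hb : before x y
    · simp only [hb, if_true]
      exact ih x (y :: ys)
    · simp only [hb, if_false, Bool.false_eq_true]
      exact ih y (PySem.List.insertBy before x ys)

-- the running best over a strictly key-sorted candidate list beats every other candidate
theorem pv_argmaxA (s : List String → Int × Int) :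
    ∀ (L : List (List String)) (m : List String), (∀ y ∈ L, m < y) → L.Pairwise (· < ·) →
      (L.foldl (fun h x => if pvBefore s x h then x else h) m = m ∨
       L.foldl (fun h x => if pvBefore s x h then x else h) m ∈ L) ∧
      (∀ y ∈ m :: L, y ≠ L.foldl (fun h x => if pvBefore s x h then x else h) m →
        pvBeats s (L.foldl (fun h x => if pvBefore s x h then x else h) m) y) := by
  intro L
  induction L with
  | nil => intro m _ _; exact ⟨Or.inl rfl, by simp⟩
  | cons x L ih =>
    intro m hlt hpw
    have hmx : m < x := hlt x (List.mem_cons_self ..)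
    have hxL : ∀ y ∈ L, x < y := fun y hy => (List.pairwise_cons.mp hpw).1 y hy
    have hmL : ∀ y ∈ L, m < y := fun y hy => hlt y (List.mem_cons_of_mem _ hy)
    have hpwL : L.Pairwise (· < ·) := (List.pairwise_cons.mp hpw).2
    simp only [List.foldl_cons]
    by_cases hb : pvBefore s x m
    · simp only [hb, if_true]
      obtain ⟨hm1, hm2⟩ := ih x hxL hpwL
      have hbx : pvBeats s x m := by
        left; exact (pvBefore_iff s x m).mp hb
      refine ⟨?_, ?_⟩
      · rcases hm1 with h | h
        · right; rw [h]; exact List.mem_cons_self ..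
        · right; exact List.mem_cons_of_mem _ h
      · intro y hy hne
        set F := L.foldl (fun h x => if pvBefore s x h then x else h) x with hF
        rcases List.mem_cons.mp hy with rfl | hy'
        · -- y = m
          rcases hm1 with h | h
          · rw [h]; exact hbx
          · have hFx : F ≠ x := by
              intro hc; rw [hc] at h
              exact absurd rfl (ne_of_gt (hxL x h))
            have := hm2 x (List.mem_cons_self ..) (Ne.symm hFx)
            exact pvBeats_trans s F x y this hbx
        · exact hm2 y hy' hne
    · simp only [hb, if_false, Bool.false_eq_true]
      obtain ⟨hm1, hm2⟩ := ih m hmL hpwL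
      have hbm : pvBeats s m x := by
        have hnb : ¬ ((s m).1 < (s x).1 ∨ ((s m).1 = (s x).1 ∧ (s m).2 < (s x).2)) := by
          intro hc; exact hb ((pvBefore_iff s x m).mpr hc)
        rcases pvBeats_total s m x (ne_of_lt hmx) with h | h
        · exact h
        · exfalso
          rcases h with h | ⟨hs, hl⟩
          · exact hnb h
          · exact absurd hmx (not_lt_of_gt hl)
      refine ⟨?_, ?_⟩
      · rcases hm1 with h | h
        · left; exact h
        · right; exact List.mem_cons_of_mem _ h
      · intro y hy hne
        set F := L.foldl (fun h x => if pvBefore s x h then x else h) m with hF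
        rcases List.mem_cons.mp hy with rfl | hy'
        · exact hm2 y (List.mem_cons_self ..) hne
        · rcases List.mem_cons.mp hy' with rfl | hy'' 
          · -- y = x
            rcases hm1 with h | h
            · rw [h]; exact hbm
            · have hFm : F ≠ m := by
                intro hc; rw [hc] at h
                exact absurd rfl (ne_of_gt (hmL m h))
              have := hm2 m (List.mem_cons_self ..) (Ne.symm hFm)
              exact pvBeats_trans s F m y this hbm
          · exact hm2 y (List.mem_cons_of_mem _ hy'') hne

-- B's arg-max scan step, abstracted over the score function
def pvStepB (s : List String → Int × Int) (acc : Option (List String) × (Int × Int)) (g : List String) :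
    Option (List String) × (Int × Int) :=
  if (s g).1 = 0 then acc
  else
    match acc.1 with
    | none => (some g, s g)
    | some b =>
      if (s g).1 > acc.2.1 ∨ ((s g).1 = acc.2.1 ∧ (s g).2 > acc.2.2) ∨ (s g = acc.2 ∧ g < b)
      then (some g, s g) else acc

theorem pv_argmaxB (s : List String → Int × Int) :
    ∀ (M : List (List String)) (acc : Option (List String) × (Int × Int)), M.Nodup →
      (∀ b, acc.1 = some b → acc.2 = s b ∧ (s b).1 ≠ 0 ∧ b ∉ M) →
      ((M.foldl (pvStepB s) acc).1 = none ↔ (acc.1 = none ∧ ∀ y ∈ M, (s y).1 = 0))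
      ∧ (∀ b', (M.foldl (pvStepB s) acc).1 = some b' →
           (M.foldl (pvStepB s) acc).2 = s b' ∧ (s b').1 ≠ 0
           ∧ (acc.1 = some b' ∨ b' ∈ M)
           ∧ (∀ y ∈ M, (s y).1 ≠ 0 → y ≠ b' → pvBeats s b' y)
           ∧ (∀ b, acc.1 = some b → b' ≠ b → pvBeats s b' b)) := by
  intro M
  induction M with
  | nil =>
    intro acc _ hacc
    refine ⟨by simp, ?_⟩
    intro b' hb'
    obtain ⟨h1, h2, _⟩ := hacc b' hb'
    exact ⟨h1, h2, Or.inl hb', by simp, fun b hb hne => absurd (hb.symm.trans hb') (by simpa using hne.symm)⟩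
  | cons g M ih =>
    intro acc hnd hacc
    have hgM : g ∉ M := (List.nodup_cons.mp hnd).1
    have hndM : M.Nodup := (List.nodup_cons.mp hnd).2
    simp only [List.foldl_cons]
    by_cases hz : (s g).1 = 0
    · have hstep : pvStepB s acc g = acc := by simp [pvStepB, hz]
      rw [hstep]
      obtain ⟨ihn, ihs⟩ := ih acc hndM (fun b hb => by
        obtain ⟨h1, h2, h3⟩ := hacc b hb
        exact ⟨h1, h2, fun hc => h3 (List.mem_cons_of_mem _ hc)⟩)
      refine ⟨?_, ?_⟩
      · rw [ihn]
        constructor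
        · rintro ⟨h1, h2⟩
          exact ⟨h1, fun y hy => by rcases List.mem_cons.mp hy with rfl | hy'; exact hz; exact h2 y hy'⟩
        · rintro ⟨h1, h2⟩
          exact ⟨h1, fun y hy => h2 y (List.mem_cons_of_mem _ hy)⟩
      · intro b' hb'
        obtain ⟨h1, h2, h3, h4, h5⟩ := ihs b' hb'
        refine ⟨h1, h2, ?_, ?_, h5⟩
        · rcases h3 with h | h; exact Or.inl h; exact Or.inr (List.mem_cons_of_mem _ h)
        · intro y hy hyz hne
          rcases List.mem_cons.mp hy with rfl | hy'
          · exact absurd hz hyz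
          · exact h4 y hy' hyz hne
    · -- g is a candidate
      rcases hacc0 : acc.1 with _ | b
      · -- best was still None: take g
        have hstep : pvStepB s acc g = (some g, s g) := by
          simp [pvStepB, hz, hacc0]
        rw [hstep]
        obtain ⟨ihn, ihs⟩ := ih (some g, s g) hndM (fun b hb => by
          obtain rfl : g = b := Option.some.inj hb
          exact ⟨rfl, hz, hgM⟩)
        refine ⟨?_, ?_⟩
        · constructor
          · intro h; exact absurd (ihn.mp h).1 (by simp)
          · rintro ⟨_, h2⟩; exact absurd (h2 g (List.mem_cons_self ..)) hz
        · intro b' hb'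
          obtain ⟨h1, h2, h3, h4, h5⟩ := ihs b' hb'
          have hb'mem : b' ∈ g :: M := by
            rcases h3 with h | h
            · rw [← Option.some.inj h]; exact List.mem_cons_self ..
            · exact List.mem_cons_of_mem _ h
          refine ⟨h1, h2, Or.inr hb'mem, ?_, ?_⟩
          · intro y hy hyz hne
            rcases List.mem_cons.mp hy with rfl | hy'
            · exact h5 y rfl (Ne.symm hne)
            · exact h4 y hy' hyz hne
          · intro b0 hb0
            simp at hb0
      · -- best was some b
        obtain ⟨h2acc, hbz, hbmem⟩ := hacc b hacc0
        have hbg : b ≠ g := fun hc => hbmem (hc ▸ List.mem_cons_self ..)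
        have hbM : b ∉ M := fun hc => hbmem (List.mem_cons_of_mem _ hc)
        have condIff : ((s g).1 > acc.2.1 ∨ ((s g).1 = acc.2.1 ∧ (s g).2 > acc.2.2) ∨ (s g = acc.2 ∧ g < b))
            ↔ pvBeats s g b := by
          rw [h2acc]; unfold pvBeats; constructor
          · rintro (h | ⟨h1a, h2a⟩ | ⟨h1a, h2a⟩)
            · exact Or.inl (Or.inl h)
            · exact Or.inl (Or.inr ⟨h1a.symm, h2a⟩)
            · exact Or.inr ⟨h1a, h2a⟩
          · rintro ((h | ⟨h1a, h2a⟩) | ⟨h1a, h2a⟩)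
            · exact Or.inl h
            · exact Or.inr (Or.inl ⟨h1a.symm, h2a⟩)
            · exact Or.inr (Or.inr ⟨h1a, h2a⟩)
        by_cases hcond : ((s g).1 > acc.2.1 ∨ ((s g).1 = acc.2.1 ∧ (s g).2 > acc.2.2) ∨ (s g = acc.2 ∧ g < b))
        · have hstep : pvStepB s acc g = (some g, s g) := by
            simp only [pvStepB, hz, if_false]
            rw [hacc0]
            simp [hcond]
          rw [hstep]
          have hgb : pvBeats s g b := condIff.mp hcond
          obtain ⟨ihn, ihs⟩ := ih (some g, s g) hndM (fun b0 hb0 => by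
            obtain rfl : g = b0 := Option.some.inj hb0
            exact ⟨rfl, hz, hgM⟩)
          refine ⟨?_, ?_⟩
          · constructor
            · intro h; exact absurd (ihn.mp h).1 (by simp)
            · rintro ⟨h1, _⟩; simp at h1
          · intro b' hb'
            obtain ⟨h1, h2, h3, h4, h5⟩ := ihs b' hb'
            have hb'mem : b' ∈ g :: M := by
              rcases h3 with h | h
              · rw [← Option.some.inj h]; exact List.mem_cons_self ..
              · exact List.mem_cons_of_mem _ h
            have hbeats_g : b' = g ∨ pvBeats s b' g := by
              rcases h3 with h | h
              · exact Or.inl (Option.some.inj h).symm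
              · have hne : b' ≠ g := fun hc => hgM (hc ▸ h)
                exact Or.inr (h5 g rfl hne)
            refine ⟨h1, h2, Or.inr hb'mem, ?_, ?_⟩
            · intro y hy hyz hne
              rcases List.mem_cons.mp hy with rfl | hy'
              · exact h5 y rfl (Ne.symm hne)
              · exact h4 y hy' hyz hne
            · intro b0 hb0 hne0
              obtain rfl : b = b0 := Option.some.inj hb0
              rcases hbeats_g with rfl | h
              · exact hgb
              · exact pvBeats_trans s b' g b h hgb
        · have hstep : pvStepB s acc g = acc := by
            simp only [pvStepB, hz, if_false]
            rw [hacc0]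
            simp [hcond]
          rw [hstep]
          have hnbeats : ¬ pvBeats s g b := fun h => hcond (condIff.mpr h)
          have hbg2 : pvBeats s b g := (pvBeats_total s g b (Ne.symm hbg)).resolve_left hnbeats
          obtain ⟨ihn, ihs⟩ := ih acc hndM (fun b0 hb0 => by
            obtain rfl : b = b0 := Option.some.inj (hacc0.symm.trans hb0)
            exact ⟨h2acc, hbz, hbM⟩)
          refine ⟨?_, ?_⟩
          · constructor
            · intro h
              obtain ⟨h1, _⟩ := ihn.mp h
              rw [hacc0] at h1; cases h1
            · rintro ⟨h1, _⟩; simp at h1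
          · intro b' hb'
            obtain ⟨h1, h2, h3, h4, h5⟩ := ihs b' hb'
            have hb'b : b' = b ∨ (b' ∈ M ∧ pvBeats s b' b) := by
              rcases h3 with h | h
              · exact Or.inl (Option.some.inj (hacc0.symm.trans h)).symm
              · have hne : b' ≠ b := fun hc => hbM (hc ▸ h)
                exact Or.inr ⟨h, h5 b hacc0 hne⟩
            refine ⟨h1, h2, ?_, ?_, ?_⟩
            · rcases h3 with h | h
              · exact Or.inl (hacc0.symm.trans h)
              · exact Or.inr (List.mem_cons_of_mem _ h)
            · intro y hy hyz hne
              rcases List.mem_cons.mp hy with rfl | hy'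
              · rcases hb'b with rfl | ⟨_, hbb⟩
                · exact hbg2
                · exact pvBeats_trans s b' b y hbb hbg2
              · exact h4 y hy' hyz hne
            · intro b0 hb0 hne0
              exact h5 b0 (hacc0.trans hb0) hne0

-- getD of the group->peptides fold
theorem pv_pd_getD (l : List (String × List String)) :
    ∀ (d : PySem.Dict (List String) (List String)) (g : List String),
      ((l.foldl (fun d x => d.insert x.2 (PySem.Set.add (d.getD x.2 []) x.1)) d).getD g []) =
        PySem.Set.update (d.getD g []) ((l.filter (fun x => x.2 == g)).map (fun x => x.1)) := by
  induction l with
  | nil => intro d g; rfl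
  | cons x l ih =>
    intro d g
    simp only [List.foldl_cons]
    rw [ih]
    by_cases hg : x.2 = g
    · subst hg
      rw [PySem.Dict.getD_insert, if_pos rfl]
      simp [PySem.Set.update_cons]
    · have hbg : (x.2 == g) = false := beq_eq_false_iff_ne.mpr hg
      simp only [List.filter_cons, hbg, Bool.false_eq_true, if_false]
      rw [PySem.Dict.getD_insert, if_neg (Ne.symm hg)]

-- ofList commutes with an element-wise filter
theorem pv_ofList_filter (q : String → Bool) (l : List String) :
    PySem.Set.ofList (l.filter q) = (PySem.Set.ofList l).filter q := by
  induction l using List.reverseRecOn with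
  | nil => rfl
  | append_singleton l x ih =>
    by_cases hq : q x
    · have h1 : List.filter q (l ++ [x]) = List.filter q l ++ [x] := by simp [hq]
      rw [h1, PySem.Set.ofList_append_singleton, PySem.Set.ofList_append_singleton,
          PySem.Set.add_eq_ite, PySem.Set.add_eq_ite]
      by_cases hx : x ∈ PySem.Set.ofList l
      · have hx' : x ∈ PySem.Set.ofList (l.filter q) := by
          rw [PySem.Set.mem_ofList] at hx ⊢
          exact List.mem_filter.mpr ⟨hx, hq⟩
        rw [if_pos hx', if_pos hx, ih]
      · have hx' : x ∉ PySem.Set.ofList (l.filter q) := by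
          rw [PySem.Set.mem_ofList] at hx ⊢
          exact fun hc => hx (List.mem_filter.mp hc).1
        rw [if_neg hx', if_neg hx, ih, List.filter_append]
        simp [hq]
    · have h1 : List.filter q (l ++ [x]) = List.filter q l := by simp [hq]
      rw [h1, PySem.Set.ofList_append_singleton, ih, PySem.Set.add_eq_ite]
      by_cases hx : x ∈ PySem.Set.ofList l
      · rw [if_pos hx]
      · rw [if_neg hx, List.filter_append]
        simp [hq]

-- updating with the not-yet-used elements = updating with everything (l nodup)
theorem pv_update_filter (l : List String) :
    ∀ (u : PySem.Set String), l.Nodup →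
      PySem.Set.update u (l.filter (fun p => decide (p ∉ u))) = PySem.Set.update u l := by
  induction l with
  | nil => intro u _; rfl
  | cons x l ih =>
    intro u hnd
    obtain ⟨hxl, hndl⟩ := List.nodup_cons.mp hnd
    by_cases hx : x ∈ u
    · simp only [List.filter_cons, hx, not_true, decide_false]
      simp only [Bool.false_eq_true, if_false]
      rw [PySem.Set.update_cons, PySem.Set.add_of_mem hx]
      exact ih u hndl
    · simp only [List.filter_cons, hx, not_false_iff, decide_true, if_pos]
      rw [PySem.Set.update_cons, PySem.Set.update_cons, PySem.Set.add_of_not_mem hx]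
      have hfe : l.filter (fun p => decide (p ∉ u)) = l.filter (fun p => decide (p ∉ u ++ [x])) := by
        apply List.filter_congr
        intro y hy
        have hyx : y ≠ x := fun hc => hxl (hc ▸ hy)
        simp [hyx]
      rw [hfe]
      exact ih (u ++ [x]) hndl

theorem pv_filter_map_fst (l : List (String × List String)) (q : String → Bool) :
    ((l.filter (fun x => q x.1)).map (fun x => x.1)) = (l.map (fun x => x.1)).filter q := by
  induction l with
  | nil => rfl
  | cons x l ih => by_cases h : q x.1 <;> simp [h, ih]

-- getD of a fold inserting V k at each key
theorem pv_getD_insertV {ν : Type} (V : List String → ν) (dflt : ν) :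
    ∀ (ks : List (List String)) (sd : PySem.Dict (List String) ν) (k : List String),
      ((ks.foldl (fun sd k => sd.insert k (V k)) sd).getD k dflt) =
        if k ∈ ks then V k else sd.getD k dflt := by
  intro ks
  induction ks with
  | nil => intro sd k; simp
  | cons k0 ks ih =>
    intro sd k
    simp only [List.foldl_cons]
    rw [ih]
    by_cases hk : k ∈ ks
    · simp [hk, List.mem_cons]
    · rw [if_neg hk, PySem.Dict.getD_insert]
      by_cases he : k = k0
      · simp [he]
      · simp [he, hk]

theorem pv_join_shift (sep a b : List Char) (rest : List (List Char)) :
    PySem.Chars.join sep ((a ++ sep ++ b) :: rest) = a ++ sep ++ PySem.Chars.join sep (b :: rest) := by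
  cases rest with
  | nil => rw [PySem.Chars.join_singleton, PySem.Chars.join_singleton]
  | cons r rs => rw [PySem.Chars.join_cons_cons, PySem.Chars.join_cons_cons]; simp [List.append_assoc]

-- '/'.join([a] ++ k) as A's string-building loop
theorem pv_join_fold : ∀ (k : List String) (s0 : String),
    k.foldl (fun s x => s ++ ("/" ++ x)) s0 = PySem.Str.join "/" (s0 :: k) := by
  intro k
  induction k with
  | nil =>
    intro s0
    apply String.toList_inj.mp
    rw [PySem.Str.toList_join]
    simp only [List.map_cons, List.map_nil, List.foldl_nil]
    rw [PySem.Chars.join_singleton]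
  | cons x k ih =>
    intro s0
    simp only [List.foldl_cons]
    rw [ih]
    apply String.toList_inj.mp
    rw [PySem.Str.toList_join, PySem.Str.toList_join]
    simp only [List.map_cons]
    have h1 : (s0 ++ ("/" ++ x)).toList = s0.toList ++ "/".toList ++ x.toList := by
      simp [List.append_assoc]
    rw [h1, pv_join_shift, PySem.Chars.join_cons_cons]


-- ---------- characterisations of the ports' dictionaries ----------

theorem pvPeps_eq_fold (data : List (String × List String)) :
    pvPeps data = data.foldl (fun d x => d.insert x.2 (PySem.Set.add (d.getD x.2 []) x.1)) PySem.Dict.empty := by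
  unfold pvPeps
  apply PySem.List.foldl_congr_mem
  intro acc x _
  simp only [PySem.Set.add_eq_ite]

theorem pvPeps_getD (data : List (String × List String)) (g : List String) :
    (pvPeps data).getD g [] = pvOrig data g := by
  rw [pvPeps_eq_fold, pv_pd_getD]
  simp only [PySem.Dict.getD_empty, PySem.Set.update_nil_left]
  rfl

theorem pvPeps_keys (data : List (String × List String)) :
    (pvPeps data).keys = PySem.Set.ofList (data.map (fun x => x.2)) := by
  rw [pvPeps_eq_fold,
    PySem.Dict.keys_foldl_insert_key (l := data) (key := fun x => x.2)
      (f := fun d x => PySem.Set.add (d.getD x.2 []) x.1) (d := PySem.Dict.empty)]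
  rw [PySem.Dict.keys_empty, PySem.Set.update_nil_left]

theorem pvPD_as_filter (data : List (String × List String)) (used : PySem.Set String) :
    pvPD data used = (data.filter (fun x => decide (x.1 ∉ used))).foldl
      (fun d x => d.insert x.2 (PySem.Set.add (d.getD x.2 []) x.1)) PySem.Dict.empty := by
  unfold pvPD
  exact PySem.List.foldl_ite_eq_foldl_filter (fun x => x.1 ∉ used)
    (fun d x => d.insert x.2 (PySem.Set.add (d.getD x.2 []) x.1)) data PySem.Dict.empty

theorem pvPD_getD (data : List (String × List String)) (used : PySem.Set String) (g : List String) :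
    (pvPD data used).getD g [] = (pvOrig data g).filter (fun p => decide (p ∉ used)) := by
  rw [pvPD_as_filter, pv_pd_getD]
  simp only [PySem.Dict.getD_empty, PySem.Set.update_nil_left]
  rw [List.filter_comm]
  rw [pv_filter_map_fst (data.filter (fun x => x.2 == g)) (fun p => decide (p ∉ used))]
  rw [pv_ofList_filter]
  rfl

theorem pvPD_keys (data : List (String × List String)) (used : PySem.Set String) :
    (pvPD data used).keys = PySem.Set.ofList ((data.filter (fun x => decide (x.1 ∉ used))).map (fun x => x.2)) := by
  rw [pvPD_as_filter,
    PySem.Dict.keys_foldl_insert_key (l := data.filter (fun x => decide (x.1 ∉ used)))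
      (key := fun x => x.2) (f := fun d x => PySem.Set.add (d.getD x.2 []) x.1)
      (d := PySem.Dict.empty)]
  rw [PySem.Dict.keys_empty, PySem.Set.update_nil_left]

theorem pvPD2_keys_perm (data : List (String × List String)) (used : PySem.Set String) :
    ((pvPD2 data used).keys).Perm ((pvPD data used).keys) := by
  have hp : (PySem.List.sorted (pvPD data used).items (fun p => p.1) false).Perm
      (pvPD data used).items := PySem.List.sorted_perm _ _ _
  simpa [pvPD2, PySem.Dict.keys] using hp.map (fun p => p.1)

theorem pvPD_keys_nodup (data : List (String × List String)) (used : PySem.Set String) :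
    (pvPD data used).keys.Nodup := by
  rw [pvPD_keys]; exact PySem.Set.nodup_ofList _

theorem pvPD2_keys_nodup (data : List (String × List String)) (used : PySem.Set String) :
    (pvPD2 data used).keys.Nodup := by
  exact (pvPD2_keys_perm data used).nodup_iff.mpr (pvPD_keys_nodup data used)

theorem pvPD2_mem_keys (data : List (String × List String)) (used : PySem.Set String) (g : List String) :
    g ∈ (pvPD2 data used).keys ↔ g ∈ (pvPD data used).keys :=
  (pvPD2_keys_perm data used).mem_iff

theorem pvPD2_getD (data : List (String × List String)) (used : PySem.Set String) (k : List String)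
    (hk : k ∈ (pvPD2 data used).keys) :
    (pvPD2 data used).getD k [] = (pvPD data used).getD k [] := by
  have hk' : k ∈ (PySem.Dict.mk (PySem.List.sorted (pvPD data used).items (fun p => p.1) false)).items.map (fun p => p.1) := by
    simpa [pvPD2, PySem.Dict.keys] using hk
  obtain ⟨p, hp, hpk⟩ := List.mem_map.mp hk'
  have hpair : (k, p.2) ∈ (pvPD2 data used).items := by
    have : p = (k, p.2) := by rw [← hpk]
    rw [← this]; exact hp
  have h1 := PySem.Dict.getD_of_mem_items (pvPD2 data used) hpair (pvPD2_keys_nodup data used) []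
  have hpd : (k, p.2) ∈ (pvPD data used).items := by
    have hperm : (PySem.List.sorted (pvPD data used).items (fun p => p.1) false).Perm
        (pvPD data used).items := PySem.List.sorted_perm _ _ _
    apply hperm.mem_iff.mp
    have : p = (k, p.2) := by rw [← hpk]
    rw [← this]
    simpa [pvPD2] using hp
  have h2 := PySem.Dict.getD_of_mem_items (pvPD data used) hpd (pvPD_keys_nodup data used) []
  rw [h1, h2]

theorem pv_sorted_pairwise_port (l : List ((List String) × (List String))) :
    (List.map (fun p => p.1) (PySem.List.sorted l (fun p => p.1) false)).Pairwise (fun a b => a ≤ b) := by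
  have hI : (fun (a b : List String) => a.decidableLT b) = @LinearOrder.toDecidableLT (List String) List.instLinearOrder := by
    funext a b; exact Subsingleton.elim _ _
  rw [hI]
  exact PySem.List.sorted_map_key_pairwise l (fun p => p.1)

theorem pvPD2_keys_sorted (data : List (String × List String)) (used : PySem.Set String) :
    ((pvPD2 data used).keys).Pairwise (· < ·) := by
  have hle : ((pvPD2 data used).keys).Pairwise (fun a b => a ≤ b) := by
    exact pv_sorted_pairwise_port (pvPD data used).items
  have hne : ((pvPD2 data used).keys).Pairwise (fun a b => a ≠ b) := pvPD2_keys_nodup data used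
  exact (hle.and hne).imp (fun h => lt_of_le_of_ne h.1 h.2)

theorem pvCnt_getD (data : List (String × List String)) (g : List String) :
    (pvCnt data).getD g 0 = ((data.map (fun x => x.2)).count g : Int) := by
  unfold pvCnt
  rw [← List.foldl_map (f := fun x : String × List String => x.2)
    (g := fun (d : PySem.Dict (List String) Int) k => d.insert k (d.getD k 0 + 1))]
  rw [PySem.Dict.getD_foldl_insert_add_one]
  simp

theorem pvOverall_getD (data : List (String × List String)) (g : List String) :
    (pvOverall data).getD g 0 = ((data.map (fun x => x.2)).count g : Int) := by
  unfold pvOverall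
  rw [← List.foldl_map (f := fun x : String × List String => x.2)
    (g := fun (d : PySem.Dict (List String) Int) k => d.modify k 0 (· + 1))]
  rw [PySem.Dict.getD_foldl_modify_add_one]
  simp

theorem pvSD_keys (data : List (String × List String)) (used : PySem.Set String) :
    (pvSD data used).keys = (pvPD2 data used).keys := by
  unfold pvSD
  rw [PySem.Dict.keys_foldl_insert (l := (pvPD2 data used).keys)
    (f := fun sd k => ((PySem.List.len ((pvPD2 data used).getD k []), (pvOverall data).getD k 0)))
    (d := PySem.Dict.empty)]
  rw [PySem.Dict.keys_empty, PySem.Set.update_nil_left]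
  exact PySem.Set.ofList_eq_self_of_nodup _ (pvPD2_keys_nodup data used)

theorem pvSD_getD (data : List (String × List String)) (used : PySem.Set String) (k : List String)
    (hk : k ∈ (pvPD2 data used).keys) :
    (pvSD data used).getD k (0, 0) = pvScore data used k := by
  unfold pvSD
  rw [pv_getD_insertV]
  rw [if_pos hk, pvPD2_getD data used k hk, pvPD_getD, pvOverall_getD]
  rfl

-- membership in A's per-iteration dict = membership in B's index with a nonzero current count
theorem pvKeys_char (data : List (String × List String)) (used : PySem.Set String) (g : List String) :
    g ∈ (pvPD2 data used).keys ↔ (g ∈ (pvPeps data).keys ∧ (pvScore data used g).1 ≠ 0) := by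
  rw [pvPD2_mem_keys, pvPD_keys, pvPeps_keys]
  have hsc : (pvScore data used g).1 ≠ 0 ↔ ∃ x ∈ data, x.2 = g ∧ x.1 ∉ used := by
    unfold pvScore
    simp only [PySem.List.len_eq]
    rw [Int.natCast_ne_zero]
    constructor
    · intro hne
      have hfil : (pvOrig data g).filter (fun p => decide (p ∉ used)) ≠ [] := by
        intro hc; rw [hc] at hne; exact hne rfl
      obtain ⟨p, hp⟩ := List.exists_mem_of_ne_nil _ hfil
      obtain ⟨hpo, hpq⟩ := List.mem_filter.mp hp
      have : p ∈ (data.filter (fun x => x.2 == g)).map (fun x => x.1) :=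
        (PySem.Set.mem_ofList _ _).mp hpo
      obtain ⟨x, hxf, hxp⟩ := List.mem_map.mp this
      obtain ⟨hxd, hxg⟩ := List.mem_filter.mp hxf
      exact ⟨x, hxd, by simpa using hxg, by rw [hxp]; simpa using hpq⟩
    · rintro ⟨x, hx, hg, hu⟩ hc
      have hmem : x.1 ∈ (pvOrig data g).filter (fun p => decide (p ∉ used)) := by
        apply List.mem_filter.mpr
        refine ⟨(PySem.Set.mem_ofList _ _).mpr ?_, by simpa using hu⟩
        exact List.mem_map.mpr ⟨x, List.mem_filter.mpr ⟨hx, by simpa using hg⟩, rfl⟩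
      rw [List.length_eq_zero_iff] at hc
      rw [hc] at hmem
      cases hmem
  rw [hsc]
  simp only [PySem.Set.mem_ofList, List.mem_map, List.mem_filter]
  constructor
  · rintro ⟨x, ⟨hx, hq⟩, hg⟩
    refine ⟨⟨x, hx, hg⟩, x, hx, hg, by simpa using hq⟩
  · rintro ⟨_, x, hx, hg, hu⟩
    exact ⟨x, ⟨hx, by simpa using hu⟩, hg⟩

-- ---------- the two selections agree ----------

theorem pvPeps_keys_nodup (data : List (String × List String)) : (pvPeps data).keys.Nodup := by
  rw [pvPeps_keys]; exact PySem.Set.nodup_ofList _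

-- B's scan is the abstract arg-max fold over the index's keys
theorem pvRes_eq_fold (data : List (String × List String)) (used : PySem.Set String) :
    pvRes data used = (pvPeps data).keys.foldl (pvStepB (pvScore data used))
      ((none : Option (List String)), ((0, 0) : Int × Int)) := by
  unfold pvRes
  rw [PySem.Dict.items_eq_map_keys (pvPeps data) (pvPeps_keys_nodup data) []]
  rw [List.foldl_map]
  apply PySem.List.foldl_congr_mem
  intro acc g _
  simp only [pvPeps_getD, pvCnt_getD]
  unfold pvStepB pvScore
  rfl

theorem pv_sel_eq (data : List (String × List String)) (used : PySem.Set String) :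
    (pvSortedKeys data used).head? = (pvRes data used).1 := by
  obtain ⟨ihn, ihs⟩ := pv_argmaxB (pvScore data used) (pvPeps data).keys
    ((none : Option (List String)), ((0, 0) : Int × Int)) (pvPeps_keys_nodup data)
    (by intro b hb; simp at hb)
  have hSDkeys := pvSD_keys data used
  have hsk : pvSortedKeys data used = ((pvSD data used).keys).foldl
      (fun acc x => PySem.List.insertBy (pvBefore (fun k => (pvSD data used).getD k (0, 0))) x acc) [] := rfl
  rcases hCcase : (pvSD data used).keys with _ | ⟨c0, rest⟩
  · -- A found no candidate group; then every group's current count is 0 and B keeps best = None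
    have hempty : pvSortedKeys data used = [] := by rw [hsk, hCcase]; rfl
    have hall : ∀ y ∈ (pvPeps data).keys, (pvScore data used y).1 = 0 := by
      intro y hy
      by_contra hne
      have hmem : y ∈ (pvPD2 data used).keys := (pvKeys_char data used y).mpr ⟨hy, hne⟩
      rw [← hSDkeys, hCcase] at hmem
      cases hmem
    rw [hempty, pvRes_eq_fold]
    simp only [List.head?_nil]
    exact (ihn.mpr ⟨rfl, hall⟩).symm
  · -- both pick the unique strictly-preferred candidate
    have hCpw : (c0 :: rest).Pairwise (· < ·) := by
      rw [← hCcase, hSDkeys]; exact pvPD2_keys_sorted data used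
    have hhead : (pvSortedKeys data used).head? =
        some (rest.foldl (fun h x => if pvBefore (fun k => (pvSD data used).getD k (0, 0)) x h then x else h) c0) := by
      rw [hsk, hCcase, List.foldl_cons]
      exact pv_head_foldl_insertBy _ rest c0 []
    obtain ⟨hh1, hh2⟩ := pv_argmaxA (fun k => (pvSD data used).getD k (0, 0)) rest c0
      (fun y hy => (List.pairwise_cons.mp hCpw).1 y hy) (List.pairwise_cons.mp hCpw).2
    set F := rest.foldl (fun h x => if pvBefore (fun k => (pvSD data used).getD k (0, 0)) x h then x else h) c0 with hF
    have hhC : F ∈ c0 :: rest := by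
      rcases hh1 with h | h
      · rw [h]; exact List.mem_cons_self ..
      · exact List.mem_cons_of_mem _ h
    have hsAeq : ∀ k ∈ c0 :: rest, (pvSD data used).getD k (0, 0) = pvScore data used k := by
      intro k hk
      apply pvSD_getD
      rw [← hSDkeys, hCcase]; exact hk
    have hbeats : ∀ y ∈ c0 :: rest, y ≠ F → pvBeats (pvScore data used) F y := by
      intro y hy hne
      have hb := hh2 y hy hne
      unfold pvBeats at hb ⊢
      simp only [hsAeq F hhC, hsAeq y hy] at hb
      exact hb
    have hhPD2 : F ∈ (pvPD2 data used).keys := by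
      rw [← hSDkeys, hCcase]; exact hhC
    obtain ⟨hhM, hhnz⟩ := (pvKeys_char data used F).mp hhPD2
    rcases hresopt : ((pvPeps data).keys.foldl (pvStepB (pvScore data used))
        ((none : Option (List String)), ((0, 0) : Int × Int))).1 with _ | b'
    · exfalso
      obtain ⟨_, hall⟩ := ihn.mp hresopt
      exact hhnz (hall F hhM)
    · obtain ⟨_, hb'nz, hb'mem, hb'beats, _⟩ := ihs b' hresopt
      have hb'M : b' ∈ (pvPeps data).keys := by
        rcases hb'mem with h | h
        · simp at h
        · exact h
      have hb'C : b' ∈ c0 :: rest := by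
        have hmem : b' ∈ (pvPD2 data used).keys := (pvKeys_char data used b').mpr ⟨hb'M, hb'nz⟩
        rw [← hSDkeys, hCcase] at hmem
        exact hmem
      have hFb' : F = b' := by
        by_contra hne
        exact pvBeats_asymm (pvScore data used) F b'
          (hbeats b' hb'C (fun hc => hne hc.symm))
          (hb'beats F hhM hhnz hne)
      rw [pvRes_eq_fold, hresopt, hhead, hFb']

theorem pv_upd_eq (data : List (String × List String)) (used : PySem.Set String) (k : List String)
    (hk : (pvSortedKeys data used).head? = some k) :
    PySem.Set.update used ((pvPD2 data used).getD k []) =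
      PySem.Set.update used ((pvPeps data).getD k []) := by
  have h1 : k ∈ pvSortedKeys data used := by
    rcases hEq : pvSortedKeys data used with _ | ⟨a, t⟩
    · rw [hEq] at hk; cases hk
    · rw [hEq] at hk
      simp only [List.head?_cons] at hk
      rw [← Option.some.inj hk]
      exact List.mem_cons_self ..
  have hmem : k ∈ (pvSD data used).keys := by
    have hperm : (pvSortedKeys data used).Perm ((pvSD data used).keys) :=
      PySem.List.sorted2_perm _ _ _ _
    exact hperm.subset h1
  rw [pvSD_keys] at hmem
  rw [pvPD2_getD data used k hmem, pvPD_getD, pvPeps_getD]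
  exact pv_update_filter (pvOrig data k) used (PySem.Set.nodup_ofList _)

-- ---------- the loops agree ----------

theorem pv_loop_eq (data : List (String × List String)) : ∀ (fuel : Nat) (used : PySem.Set String) (proteins : List String),
    reduce_cluster_loop data (PySem.Set.ofList (data.map (fun x => x.1))) (pvOverall data) fuel used proteins =
    reduce_cluster_alt_loop (pvPeps data) (pvCnt data)
      (PySem.Set.len (PySem.Set.ofList (data.map (fun x => x.1)))) fuel used proteins := by
  intro fuel
  induction fuel with
  | zero => intro used proteins; rfl
  | succ fuel ih =>
    intro used proteins
    show (if PySem.Set.len used ≠ PySem.Set.len (PySem.Set.ofList (data.map (fun x => x.1))) then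
        match pvSortedKeys data used with
        | [] => proteins
        | k :: _ =>
          reduce_cluster_loop data (PySem.Set.ofList (data.map (fun x => x.1))) (pvOverall data) fuel
            (PySem.Set.update used ((pvPD2 data used).getD k []))
            (proteins ++ [k.foldl (fun s x => s ++ ("/" ++ x)) (PySem.Int.toStr (PySem.List.len k))])
      else proteins)
      = (if PySem.Set.len used ≠ PySem.Set.len (PySem.Set.ofList (data.map (fun x => x.1))) then
        match (pvRes data used).1 with
        | none => proteins
        | some b =>
          reduce_cluster_alt_loop (pvPeps data) (pvCnt data)
            (PySem.Set.len (PySem.Set.ofList (data.map (fun x => x.1)))) fuel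
            (PySem.Set.update used ((pvPeps data).getD b []))
            (proteins ++ [PySem.Str.join "/" (PySem.Int.toStr (PySem.List.len b) :: b)])
      else proteins)
    by_cases hc : PySem.Set.len used ≠ PySem.Set.len (PySem.Set.ofList (data.map (fun x => x.1)))
    · rw [if_pos hc, if_pos hc]
      rcases hS : pvSortedKeys data used with _ | ⟨k, t⟩
      · have hres : (pvRes data used).1 = none := by rw [← pv_sel_eq, hS]; rfl
        rw [hres]
      · have hhead : (pvSortedKeys data used).head? = some k := by rw [hS]; rfl
        have hres : (pvRes data used).1 = some k := by rw [← pv_sel_eq]; exact hhead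
        rw [hres]
        show reduce_cluster_loop data (PySem.Set.ofList (data.map (fun x => x.1))) (pvOverall data) fuel
            (PySem.Set.update used ((pvPD2 data used).getD k []))
            (proteins ++ [k.foldl (fun s x => s ++ ("/" ++ x)) (PySem.Int.toStr (PySem.List.len k))])
          = reduce_cluster_alt_loop (pvPeps data) (pvCnt data)
            (PySem.Set.len (PySem.Set.ofList (data.map (fun x => x.1)))) fuel
            (PySem.Set.update used ((pvPeps data).getD k []))
            (proteins ++ [PySem.Str.join "/" (PySem.Int.toStr (PySem.List.len k) :: k)])
        rw [pv_upd_eq data used k hhead, pv_join_fold]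
        exact ih _ _
    · rw [if_neg hc, if_neg hc]

theorem reduce_cluster_spec : Claim_equal_reduce_cluster := by
  intro data _
  unfold Spec_reduce_cluster reduce_cluster reduce_cluster_alt
  exact pv_loop_eq data _ PySem.Set.empty []
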